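-- pv_equiv track=rewrite | github.com/manirathnam2001/ManiUMN-MI_chatbots | pdf_utils.py | _soft_wrap_long_tokens
-- ===== SOURCE A (Python) =====
-- def _soft_wrap_long_tokens(text: str, max_len: int = 30) -> str:
--     """
--     Insert zero-width spaces into very long tokens to enable wrapping.
--
--     This helps prevent long unbreakable strings (like URLs or concatenated words)
--     from overflowing table cells by inserting Unicode zero-width spaces that
--     allow line breaks without changing the visual appearance.
--
--     Args:
--         text: Text that may contain long tokens
--         max_len: Maximum token length before inserting break opportunities
--
--     Returns:
--         Text with zero-width spaces inserted for better wrapping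
--     """
--     if not text:
--         return text
--
--     words = text.split()
--     result = []
--
--     for word in words:
--         if len(word) > max_len:
--             # Insert zero-width space every max_len characters
--             broken = ''
--             for i, char in enumerate(word):
--                 broken += char
--                 if (i + 1) % max_len == 0 and i < len(word) - 1:
--                     broken += '\u200b'  # Zero-width space
--             result.append(broken)
--         else:
--             result.append(word)
--
--     return ' '.join(result)
-- ===== SOURCE B (Python) =====
-- def _soft_wrap_long_tokens(text: str, max_len: int = 30) -> str:
--     """Insert zero-width spaces into very long tokens to enable wrapping."""
--     if not text:
--         return text
--     zwsp = '\u200b'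
--
--     def wrap(w):
--         return zwsp.join(w[i:i + max_len] for i in range(0, len(w), max_len))
--
--     return ' '.join(wrap(w) if len(w) > max_len else w for w in text.split())
-- ===== Notes on version B (the rewrite author's own statement) =====
-- stated objective: faster
-- what changed: Replaces A's per-character loop (enumerate index, modulo counter, repeated string concatenation) by slicing each long token into max_len-sized chunks with range/slices and joining the chunks with the zero-width space.
-- outside the precondition, e.g. on _soft_wrap_long_tokens('abcd', -2): A returns 'ab\u200bcd', B returns ''; on _soft_wrap_long_tokens('abc', 0): A raises ZeroDivisionError, B raises ValueError
import Mathlib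
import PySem

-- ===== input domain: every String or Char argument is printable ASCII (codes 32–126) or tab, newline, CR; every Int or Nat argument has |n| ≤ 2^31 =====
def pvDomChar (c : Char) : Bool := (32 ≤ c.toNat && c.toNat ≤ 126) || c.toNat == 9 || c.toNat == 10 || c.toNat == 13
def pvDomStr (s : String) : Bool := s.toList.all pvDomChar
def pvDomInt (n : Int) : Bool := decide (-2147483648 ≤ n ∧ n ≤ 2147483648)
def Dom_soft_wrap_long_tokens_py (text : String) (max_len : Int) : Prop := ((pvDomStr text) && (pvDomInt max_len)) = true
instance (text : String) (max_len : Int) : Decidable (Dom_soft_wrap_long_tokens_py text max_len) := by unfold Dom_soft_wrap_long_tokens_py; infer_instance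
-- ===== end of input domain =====

-- B: instead of A's per-character loop with an enumerate index, a modulo counter and
-- repeated string concatenation, slice each long token into max_len-sized chunks
-- (range with step max_len) and join the chunks with the zero-width space.


-- ===== PORT A =====
def soft_wrap_long_tokens_py (text : String) (max_len : Int) : String :=
  if text == "" then text
  else
    let words := PySem.Str.split₀ text
    let result := words.foldl (fun result word =>
      if max_len < PySem.Str.len word then
        let broken := (PySem.List.enumerate word.toList).foldl (fun broken ic =>
          let b := broken ++ [ic.2]
          if PySem.Int.mod (ic.1 + 1) max_len == 0 && decide (ic.1 < PySem.Str.len word - 1)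
          then b ++ "\u200b".toList else b) ([] : List Char)
        result ++ [String.ofList broken]
      else result ++ [word]) ([] : List String)
    PySem.Str.join " " result

-- ===== PORT B =====
def soft_wrap_long_tokens_py_alt (text : String) (max_len : Int) : String :=
  if text == "" then text
  else
    let wrap : String → String := fun w =>
      PySem.Str.join "\u200b"
        ((PySem.List.pyRange 0 (PySem.Str.len w) max_len).map
          (fun i => String.ofList (PySem.List.slice w.toList (some i) (some (i + max_len)))))
    PySem.Str.join " " ((PySem.Str.split₀ text).map
      (fun w => if max_len < PySem.Str.len w then wrap w else w))

-- ===== PRECONDITION & SPEC =====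
-- Pre_ restricts max_len to the function's natural domain, a positive wrap threshold,
-- except when the text contains no token at all (then max_len is never consulted):
-- at max_len = 0 A raises ZeroDivisionError on any nonempty token, and for negative
-- max_len A returns a value only via Python's negative-modulo accident (breaking every
-- |max_len| characters) while B's range-based chunking raises at 0 and produces no chunks at all otherwise.
def Pre_soft_wrap_long_tokens_py (text : String) (max_len : Int) : Prop :=
  1 ≤ max_len ∨ PySem.Str.split₀ text = []
instance (text : String) (max_len : Int) : Decidable (Pre_soft_wrap_long_tokens_py text max_len) := by unfold Pre_soft_wrap_long_tokens_py; infer_instance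
def pvWitness_soft_wrap_long_tokens_py : String × Int := ("abcdefgh xy", 3)

def Spec_soft_wrap_long_tokens_py (text : String) (max_len : Int) (out : String) : Prop := out = soft_wrap_long_tokens_py_alt text max_len
instance (text : String) (max_len : Int) (out : String) : Decidable (Spec_soft_wrap_long_tokens_py text max_len out) := by unfold Spec_soft_wrap_long_tokens_py; infer_instance

-- ===== CLAIM (what is proved, stated in full; the proofs are below) =====
def Claim_equal_soft_wrap_long_tokens_py : Prop := ∀ (text : String) (max_len : Int), Dom_soft_wrap_long_tokens_py text max_len → Pre_soft_wrap_long_tokens_py text max_len → Spec_soft_wrap_long_tokens_py text max_len (soft_wrap_long_tokens_py text max_len)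

-- ===== LEMMAS AND PROOFS =====

-- proof-side normal form of A's inner loop: the characters woven with a zero-width
-- space after every M-th position that is not the last one
def pvWeave (M n : Nat) : Nat → List Char → List Char
  | _, [] => []
  | i, c :: rest =>
    if (i + 1) % M = 0 ∧ i + 1 < n then c :: '\u200b' :: pvWeave M n (i + 1) rest
    else c :: pvWeave M n (i + 1) rest

-- proof-side normal form of B's chunking: r characters remain in the current chunk
def pvT (M : Nat) : Nat → List Char → List Char
  | _, [] => []
  | r, c :: cs =>
    if cs = [] then [c]
    else if r = 1 then c :: '\u200b' :: pvT M M cs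
    else c :: pvT M (r - 1) cs

lemma pvSuccMod (i M : Nat) (h : 1 ≤ M) :
    (i + 1) % M = if i % M + 1 = M then 0 else i % M + 1 := by
  have hd := Nat.div_add_mod i M
  have hlt : i % M < M := Nat.mod_lt _ h
  split
  · next he =>
    have e1 : M * (i / M + 1) = M * (i / M) + M := by ring
    have : i + 1 = M * (i / M + 1) := by omega
    rw [this, Nat.mul_mod_right]
  · next he =>
    have : i + 1 = M * (i / M) + (i % M + 1) := by omega
    rw [this, Nat.mul_add_mod]
    exact Nat.mod_eq_of_lt (by omega)

lemma pvFoldA (m : Int) (hm : 1 ≤ m) (w : String) :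
    ∀ (cs : List Char) (i : Nat) (acc : List Char),
    (PySem.List.enumerate cs (i : Int)).foldl (fun broken ic =>
        let b := broken ++ [ic.2]
        if PySem.Int.mod (ic.1 + 1) m == 0 && decide (ic.1 < PySem.Str.len w - 1)
        then b ++ "\u200b".toList else b) acc
      = acc ++ pvWeave m.toNat w.toList.length i cs := by
  have hz : ("\u200b" : String).toList = ['\u200b'] := by decide
  intro cs
  induction cs with
  | nil => intro i acc; simp [PySem.List.enumerate, pvWeave]
  | cons c rest ih =>
    intro i acc
    rw [PySem.List.enumerate_cons, List.foldl_cons]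
    simp only [] at ih ⊢
    have hcast : (i : Int) + 1 = ((i + 1 : Nat) : Int) := by push_cast; ring
    have hmc : m = ((m.toNat : Nat) : Int) := (Int.toNat_of_nonneg (by omega)).symm
    have hm0 : PySem.Int.mod ((i : Int) + 1) m = (((i + 1) % m.toNat : Nat) : Int) := by
      conv_lhs => rw [hcast, hmc]
      rw [PySem.Int.mod_natCast]
    have hcond : (PySem.Int.mod ((i : Int) + 1) m == 0
          && decide ((i : Int) < PySem.Str.len w - 1))
        = decide ((i + 1) % m.toNat = 0 ∧ i + 1 < w.toList.length) := by
      rw [hm0, PySem.Str.len_eq, Bool.eq_iff_iff]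
      simp only [Bool.and_eq_true, beq_iff_eq, decide_eq_true_eq, Int.natCast_eq_zero]
      omega
    rw [hcond]
    by_cases hc : (i + 1) % m.toNat = 0 ∧ i + 1 < w.toList.length
    · rw [decide_eq_true hc, if_pos rfl, hcast, ih (i + 1), pvWeave, if_pos hc]
      simp [hz]
    · rw [decide_eq_false hc, if_neg (by simp), hcast, ih (i + 1), pvWeave, if_neg hc]
      simp

lemma pvWeave_eq_T (M : Nat) (hM : 1 ≤ M) :
    ∀ (cs : List Char) (i n : Nat), i + cs.length = n →
    pvWeave M n i cs = pvT M (M - i % M) cs := by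
  intro cs
  induction cs with
  | nil => intro i n _; simp [pvWeave, pvT]
  | cons c rest ih =>
    intro i n hn
    have hlt : i % M < M := Nat.mod_lt _ hM
    have hsucc := pvSuccMod i M hM
    rw [pvWeave, pvT]
    by_cases hrest : rest = []
    · subst hrest
      have : ¬ (i + 1 < n) := by simp at hn; omega
      simp [this, pvWeave]
    · have hlen : i + 1 < n := by
        have : rest.length ≥ 1 := by cases rest; simp at hrest; simp
        simp at hn; omega
      simp only [List.length_cons] at hn
      by_cases hr1 : M - i % M = 1
      · have hmod : (i + 1) % M = 0 := by rw [hsucc]; simp; omega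
        rw [if_pos ⟨hmod, hlen⟩, if_neg hrest, if_pos hr1, ih (i + 1) n (by omega)]
        have he : M - (i + 1) % M = M := by rw [hmod]; omega
        rw [he]
      · have hne : ¬ (i % M + 1 = M) := by omega
        have hmod : (i + 1) % M = i % M + 1 := by rw [hsucc, if_neg hne]
        have hmodne : ¬ ((i + 1) % M = 0) := by omega
        rw [if_neg (by tauto), if_neg hrest, if_neg hr1, ih (i + 1) n (by omega)]
        have he : M - (i + 1) % M = M - i % M - 1 := by rw [hmod]; omega
        rw [he]

lemma pvT_rec (M : Nat) (_hM : 1 ≤ M) :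
    ∀ (cs : List Char) (r : Nat), 1 ≤ r → r ≤ M →
    pvT M r cs = if cs.length ≤ r then cs else cs.take r ++ '\u200b' :: pvT M M (cs.drop r) := by
  intro cs
  induction cs with
  | nil => intro r _ _; simp [pvT]
  | cons c rest ih =>
    intro r hr1 hrM
    rw [pvT]
    by_cases hrest : rest = []
    · subst hrest; simp [hr1]
    · have hrlen : 1 ≤ rest.length := by cases rest; simp at hrest; simp
      obtain ⟨s, rfl⟩ : ∃ s, r = s + 1 := ⟨r - 1, by omega⟩
      by_cases hx : s = 0
      · subst hx
        rw [if_neg hrest, if_pos rfl, if_neg (by simp; omega)]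
        simp
      · rw [if_neg hrest, if_neg (by omega), Nat.add_sub_cancel, ih s (by omega) (by omega)]
        by_cases hl : rest.length ≤ s
        · rw [if_pos hl, if_pos (by simp; omega)]
        · rw [if_neg hl, if_neg (by simp; omega), List.take_succ_cons, List.drop_succ_cons]
          simp

lemma pvChunksAux (m : Int) (hm : 1 ≤ m) :
    ∀ (k : Nat) (cs : List Char), cs.length ≤ k → cs ≠ [] →
    PySem.Chars.join ['\u200b']
        ((PySem.List.pyRange 0 (cs.length : Int) m).map
          (fun i => PySem.List.slice cs (some i) (some (i + m))))
      = pvT m.toNat m.toNat cs := by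
  intro k
  induction k with
  | zero => intro cs hlen hne; cases cs; simp at hne; simp at hlen
  | succ k ih =>
    intro cs hlen hne
    have hn1 : 1 ≤ cs.length := by cases cs; simp at hne; simp
    have hM1 : 1 ≤ m.toNat := by omega
    have hmm : ((m.toNat : Nat) : Int) = m := Int.toNat_of_nonneg (by omega)
    rw [PySem.List.pyRange_of_pos _ _ (by omega)]
    rw [if_pos (by exact_mod_cast hn1)]
    by_cases hcase : cs.length ≤ m.toNat
    · -- one single chunk
      have hK : (((cs.length : Int) - 0 + m - 1) / m).toNat = 1 := by
        have h1 : PySem.Int.floordiv ((cs.length : Int) - 0 + m - 1) m = 1 := by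
          rw [PySem.Int.floordiv_eq_iff_of_pos (by omega)]
          constructor <;> [omega; (push_cast; omega)]
        rw [PySem.Int.floordiv_eq_ediv_of_pos (by omega)] at h1
        omega
      rw [hK]
      have hr1 : List.range 1 = [0] := rfl
      rw [hr1]
      simp only [List.map_cons, List.map_nil, Nat.cast_zero, mul_zero, add_zero]
      rw [PySem.Chars.join_singleton]
      rw [PySem.List.slice_zero_start, PySem.List.slice_to cs (show (0:Int) ≤ 0 + m by omega)]
      rw [pvT_rec m.toNat hM1 cs m.toNat (by omega) (le_refl _), if_pos hcase]
      have he : (0 + m).toNat = m.toNat := by omega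
      rw [he, List.take_of_length_le hcase]
    · -- head chunk, then recurse on the dropped tail
      have hlt : m.toNat < cs.length := by omega
      have hdl : (cs.drop m.toNat).length = cs.length - m.toNat := by simp
      have hdropne : cs.drop m.toNat ≠ [] := by
        intro h
        have := congrArg List.length h
        simp at this; omega
      have hK : (((cs.length : Int) - 0 + m - 1) / m).toNat
          = ((((cs.length - m.toNat : Nat) : Int) - 0 + m - 1) / m).toNat + 1 := by
        have e1 : ((cs.length : Int) - 0 + m - 1)
            = ((((cs.length - m.toNat : Nat) : Int) - 0 + m - 1)) + 1 * m := by
          omega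
        rw [e1, Int.add_mul_ediv_right _ _ (show m ≠ 0 by omega)]
        have hge : 0 ≤ (((cs.length - m.toNat : Nat) : Int) - 0 + m - 1) / m :=
          Int.ediv_nonneg (by omega) (by omega)
        omega
      rw [hK, List.range_succ_eq_map]
      simp only [List.map_cons, List.map_map, Nat.cast_zero, mul_zero, add_zero]
      rw [PySem.List.slice_zero_start, PySem.List.slice_to cs (show (0:Int) ≤ 0 + m by omega)]
      have hhead : (0 + m).toNat = m.toNat := by omega
      rw [hhead]
      have htail : List.map ((fun i => PySem.List.slice cs (some i) (some (i + m)))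
              ∘ (fun k : Nat => (0:Int) + m * (k : Int)) ∘ Nat.succ)
            (List.range ((((cs.length - m.toNat : Nat) : Int) - 0 + m - 1) / m).toNat)
          = List.map (fun i => PySem.List.slice (cs.drop m.toNat) (some i) (some (i + m)))
              (PySem.List.pyRange 0 ((cs.drop m.toNat).length : Int) m) := by
        rw [PySem.List.pyRange_of_pos _ _ (show (0:Int) < m by omega)]
        rw [if_pos (by rw [hdl]; omega)]
        rw [List.map_map, hdl]
        apply List.map_congr_left
        intro a _
        simp only [Function.comp_apply, Nat.succ_eq_add_one]
        rw [← hmm]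
        have n1 : (0:Int) + ((m.toNat : Nat) : Int) * ((a + 1 : Nat) : Int)
            = ((m.toNat * (a + 1) : Nat) : Int) := by push_cast; ring
        have n2 : (0:Int) + ((m.toNat : Nat) : Int) * ((a : Nat) : Int)
            = ((m.toNat * a : Nat) : Int) := by push_cast; ring
        rw [n1, n2, PySem.List.slice_natCast_add, PySem.List.slice_natCast_add, List.drop_drop]
        congr 2
        rw [show ((m.toNat : Nat) : Int).toNat = m.toNat by omega]
        ring
      rw [htail]
      have hreq := ih (cs.drop m.toNat) (by rw [hdl]; omega) hdropne
      rcases hx : (PySem.List.pyRange 0 ((cs.drop m.toNat).length : Int) m).map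
          (fun i => PySem.List.slice (cs.drop m.toNat) (some i) (some (i + m))) with _ | ⟨q, rest⟩
      · exfalso
        obtain ⟨c', cs', hd⟩ := List.exists_cons_of_ne_nil hdropne
        rw [hx, hd] at hreq
        simp only [PySem.Chars.join] at hreq
        have hnil : (['\u200b'] : List Char).intercalate ([] : List (List Char)) = [] := rfl
        rw [hnil, pvT] at hreq
        by_cases h1 : cs' = [] <;> by_cases h2 : m.toNat = 1 <;> simp [h1, h2] at hreq
      · rw [hx] at hreq
        rw [PySem.Chars.join_cons_cons, hreq]
        rw [pvT_rec m.toNat hM1 cs m.toNat (by omega) (le_refl _), if_neg (by omega)]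
        simp

-- per-word equality, stated exactly as the two ports compute a long word
lemma pvWord (m : Int) (hm : 1 ≤ m) (w : String) (hw : m < PySem.Str.len w) :
    String.ofList ((PySem.List.enumerate w.toList).foldl (fun broken ic =>
        let b := broken ++ [ic.2]
        if PySem.Int.mod (ic.1 + 1) m == 0 && decide (ic.1 < PySem.Str.len w - 1)
        then b ++ "\u200b".toList else b) ([] : List Char))
      = PySem.Str.join "\u200b"
          ((PySem.List.pyRange 0 (PySem.Str.len w) m).map
            (fun i => String.ofList (PySem.List.slice w.toList (some i) (some (i + m))))) := by
  have hne : w.toList ≠ [] := by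
    intro h
    rw [PySem.Str.len_eq, h] at hw
    simp at hw; omega
  apply String.toList_inj.mp
  rw [String.toList_ofList, PySem.Str.toList_join, List.map_map]
  have hA : (PySem.List.enumerate w.toList).foldl (fun broken ic =>
        let b := broken ++ [ic.2]
        if PySem.Int.mod (ic.1 + 1) m == 0 && decide (ic.1 < PySem.Str.len w - 1)
        then b ++ "\u200b".toList else b) ([] : List Char)
      = pvWeave m.toNat w.toList.length 0 w.toList := by
    have := pvFoldA m hm w w.toList 0 []
    simpa using this
  rw [hA]
  rw [pvWeave_eq_T m.toNat (by omega) w.toList 0 w.toList.length (by simp)]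
  have h0 : m.toNat - 0 % m.toNat = m.toNat := by simp
  rw [h0]
  have hB := pvChunksAux m hm w.toList.length w.toList (le_refl _) hne
  rw [← hB, PySem.Str.len_eq]
  congr 1
  apply List.map_congr_left
  intro a _
  simp

-- A's result list, built by appending to an accumulator, is B's mapped word list
lemma pvTop (m : Int) (hm : 1 ≤ m) :
    ∀ (ws : List String) (acc : List String),
    ws.foldl (fun result word =>
      if m < PySem.Str.len word then
        let broken := (PySem.List.enumerate word.toList).foldl (fun broken ic =>
          let b := broken ++ [ic.2]
          if PySem.Int.mod (ic.1 + 1) m == 0 && decide (ic.1 < PySem.Str.len word - 1)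
          then b ++ "\u200b".toList else b) ([] : List Char)
        result ++ [String.ofList broken]
      else result ++ [word]) acc
    = acc ++ ws.map (fun w => if m < PySem.Str.len w then
        PySem.Str.join "\u200b"
          ((PySem.List.pyRange 0 (PySem.Str.len w) m).map
            (fun i => String.ofList (PySem.List.slice w.toList (some i) (some (i + m))))) else w) := by
  intro ws
  induction ws with
  | nil => intro acc; simp
  | cons w rest ih =>
    intro acc
    rw [List.foldl_cons, List.map_cons]
    by_cases hw : m < PySem.Str.len w
    · simp only [hw, if_pos]
      rw [ih, pvWord m hm w hw]
      simp
    · simp only [hw, if_neg, not_false_iff]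
      rw [ih]
      simp

-- ===== VERDICT (by name: the statement is the Claim_ definition above) =====
theorem soft_wrap_long_tokens_py_spec : Claim_equal_soft_wrap_long_tokens_py := by
  intro text max_len hdom hpre
  unfold Spec_soft_wrap_long_tokens_py soft_wrap_long_tokens_py soft_wrap_long_tokens_py_alt
  by_cases hempty : text == ""
  · simp [hempty]
  · simp only [hempty, Bool.false_eq_true, if_false]
    rcases hpre with hpre' | hnil
    · congr 1
      have := pvTop max_len hpre' (PySem.Str.split₀ text) []
      simpa using this
    · rw [hnil]
      simp
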